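-- pv_equiv track=rewrite | github.com/tiagomascosta/llm4testgen | utils/test_executor.py | count_error_types
-- ===== SOURCE A (Python) =====
-- from typing import Tuple, Optional, List, Dict
--
-- def count_error_types(failure_details: Dict[str, str], test_methods: List[str]) -> Dict[str, int]:
--     """
--     Count the number of each error type from failure details.
--
--     Args:
--         failure_details: Dictionary mapping test method names to failure categories
--         test_methods: List of all test method names
--
--     Returns:
--         Dictionary with counts for each error type
--     """
--     error_counts = {
--         "assertion_error": 0,
--         "runtime_error": 0,
--         "timeout": 0
--     }
--
--     for method in test_methods:
--         failure_type = failure_details.get(method)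
--         if failure_type in error_counts:
--             error_counts[failure_type] += 1
--
--     return error_counts
-- ===== SOURCE B (Python) =====
-- def count_error_types(failure_details, test_methods):
--     """Count tracked error types by iterating failures once, weighted by a prebuilt method-frequency table."""
--     freq = {}
--     for m in test_methods:
--         freq[m] = freq.get(m, 0) + 1
--     result = {"assertion_error": 0, "runtime_error": 0, "timeout": 0}
--     for method, ftype in failure_details.items():
--         if ftype in result:
--             result[ftype] += freq.get(method, 0)
--     return result
-- ===== Notes on version B (the rewrite author's own statement) =====
-- stated objective: alternative
-- what changed: B inverts the loop structure: instead of A's scan over test_methods with a dict lookup per method, B builds a frequency table of test_methods once and then makes a single pass over failure_details.items(), adding each method's multiplicity to its category bucket.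
import Mathlib
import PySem

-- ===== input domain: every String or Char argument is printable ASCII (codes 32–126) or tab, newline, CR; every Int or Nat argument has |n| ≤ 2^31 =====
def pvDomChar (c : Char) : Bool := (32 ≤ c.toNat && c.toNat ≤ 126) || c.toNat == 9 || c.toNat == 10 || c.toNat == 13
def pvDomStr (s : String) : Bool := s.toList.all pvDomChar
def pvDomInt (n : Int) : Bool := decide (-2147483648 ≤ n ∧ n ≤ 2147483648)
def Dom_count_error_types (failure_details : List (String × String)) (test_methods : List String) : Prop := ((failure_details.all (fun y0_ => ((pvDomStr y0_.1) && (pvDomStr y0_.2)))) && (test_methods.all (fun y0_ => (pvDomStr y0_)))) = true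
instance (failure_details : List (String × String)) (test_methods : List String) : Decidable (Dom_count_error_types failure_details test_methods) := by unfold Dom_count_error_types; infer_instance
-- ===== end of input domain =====

-- B replaces A's scan of test_methods (a dict lookup per method) with one pass over the
-- failure entries, weighted by a prebuilt method-frequency table (objective: alternative decomposition).

-- ===== PORT A =====
-- A: init the 3-key dict, loop over test_methods, look the method up, bump the bucket if tracked.
def count_error_types (failure_details : List (String × String)) (test_methods : List String) : List (String × Int) :=
  let fd : PySem.Dict String String := PySem.Dict.mk failure_details
  let error_counts : PySem.Dict String Int :=
    ((PySem.Dict.empty.insert "assertion_error" 0).insert "runtime_error" 0).insert "timeout" 0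
  let final := test_methods.foldl (fun ec method =>
    match fd.get? method with
    | some failure_type =>
        if ec.contains failure_type then ec.modify failure_type 0 (· + 1) else ec
    | none => ec) error_counts   -- 'None in error_counts' is False: no branch taken
  final.items

-- ===== PORT B =====
-- B: build freq = multiplicity of each method in test_methods, then one pass over the failures.
def count_error_types_alt (failure_details : List (String × String)) (test_methods : List String) : List (String × Int) :=
  let freq : PySem.Dict String Int :=
    test_methods.foldl (fun d m => d.insert m (d.getD m 0 + 1)) PySem.Dict.empty
  let result0 : PySem.Dict String Int :=
    ((PySem.Dict.empty.insert "assertion_error" 0).insert "runtime_error" 0).insert "timeout" 0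
  let result := failure_details.foldl (fun r p =>
    if r.contains p.2 then r.modify p.2 0 (· + freq.getD p.1 0) else r) result0
  result.items

-- ===== PRECONDITION & SPEC =====
-- Pre_ excludes association lists with duplicate keys: they do not arise from any Python dict,
-- and there A's first-match lookup vs B's iteration over all entries make the value accidental.
def Pre_count_error_types (failure_details : List (String × String)) (test_methods : List String) : Prop :=
  (failure_details.map Prod.fst).Nodup
instance (failure_details : List (String × String)) (test_methods : List String) : Decidable (Pre_count_error_types failure_details test_methods) := by unfold Pre_count_error_types; infer_instance
def pvWitness_count_error_types : (List (String × String)) × List String :=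
  ([("test_a", "assertion_error"), ("test_b", "timeout")], ["test_a", "test_b", "test_a"])

def Spec_count_error_types (failure_details : List (String × String)) (test_methods : List String) (out : List (String × Int)) : Prop := out = count_error_types_alt failure_details test_methods
instance (failure_details : List (String × String)) (test_methods : List String) (out : List (String × Int)) : Decidable (Spec_count_error_types failure_details test_methods out) := by unfold Spec_count_error_types; infer_instance

-- ===== CLAIM (what is proved, stated in full; the proofs are below) =====
def Claim_equal_count_error_types : Prop := ∀ (failure_details : List (String × String)) (test_methods : List String), Dom_count_error_types failure_details test_methods → Pre_count_error_types failure_details test_methods → Spec_count_error_types failure_details test_methods (count_error_types failure_details test_methods)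

-- ===== LEMMAS AND PROOFS =====

-- the 3-slot state both loops maintain
def pvD3 (a b c : Int) : PySem.Dict String Int :=
  PySem.Dict.mk [("assertion_error", a), ("runtime_error", b), ("timeout", c)]

-- how many methods of ms the dict fd maps to t (drives A's loop)
def pvCA (fd : PySem.Dict String String) (t : String) (ms : List String) : Int :=
  ((ms.filter (fun m => fd.get? m == some t)).length : Int)

-- B's weighted sum over the failure entries with category t (weight w = freq lookup)
def pvCB (ps : List (String × String)) (t : String) (w : String → Int) : Int :=
  ((ps.filter (fun p => p.2 == t)).map (fun p => w p.1)).sum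

theorem pvA_loop (fd : PySem.Dict String String) (ms : List String) (a b c : Int) :
    ms.foldl (fun ec method =>
      match fd.get? method with
      | some failure_type =>
          if ec.contains failure_type then ec.modify failure_type 0 (· + 1) else ec
      | none => ec) (pvD3 a b c)
    = pvD3 (a + pvCA fd "assertion_error" ms) (b + pvCA fd "runtime_error" ms)
           (c + pvCA fd "timeout" ms) := by
  induction ms generalizing a b c with
  | nil => simp [pvCA]
  | cons m ms ih =>
    rcases h : fd.get? m with _ | t
    · simp only [List.foldl_cons, h, ih]
      unfold pvCA
      simp [h]
    · by_cases h1 : t = "assertion_error"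
      · subst h1
        have hc : (pvD3 a b c).contains "assertion_error" = true := rfl
        have hm : (pvD3 a b c).modify "assertion_error" 0 (· + 1) = pvD3 (a + 1) b c := rfl
        simp only [List.foldl_cons, h, hc, if_true, hm, ih]
        have e1 : pvCA fd "assertion_error" (m :: ms) = pvCA fd "assertion_error" ms + 1 := by
          unfold pvCA; simp [h]
        have e2 : pvCA fd "runtime_error" (m :: ms) = pvCA fd "runtime_error" ms := by
          unfold pvCA; simp [h]
        have e3 : pvCA fd "timeout" (m :: ms) = pvCA fd "timeout" ms := by
          unfold pvCA; simp [h]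
        rw [e1, e2, e3]
        simp only [pvD3, PySem.Dict.mk.injEq, List.cons.injEq, Prod.mk.injEq, true_and, and_true]
        omega
      · by_cases h2 : t = "runtime_error"
        · subst h2
          have hc : (pvD3 a b c).contains "runtime_error" = true := rfl
          have hm : (pvD3 a b c).modify "runtime_error" 0 (· + 1) = pvD3 a (b + 1) c := rfl
          simp only [List.foldl_cons, h, hc, if_true, hm, ih]
          have e1 : pvCA fd "assertion_error" (m :: ms) = pvCA fd "assertion_error" ms := by
            unfold pvCA; simp [h]
          have e2 : pvCA fd "runtime_error" (m :: ms) = pvCA fd "runtime_error" ms + 1 := by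
            unfold pvCA; simp [h]
          have e3 : pvCA fd "timeout" (m :: ms) = pvCA fd "timeout" ms := by
            unfold pvCA; simp [h]
          rw [e1, e2, e3]
          simp only [pvD3, PySem.Dict.mk.injEq, List.cons.injEq, Prod.mk.injEq, true_and, and_true]
          omega
        · by_cases h3 : t = "timeout"
          · subst h3
            have hc : (pvD3 a b c).contains "timeout" = true := rfl
            have hm : (pvD3 a b c).modify "timeout" 0 (· + 1) = pvD3 a b (c + 1) := rfl
            simp only [List.foldl_cons, h, hc, if_true, hm, ih]
            have e1 : pvCA fd "assertion_error" (m :: ms) = pvCA fd "assertion_error" ms := by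
              unfold pvCA; simp [h]
            have e2 : pvCA fd "runtime_error" (m :: ms) = pvCA fd "runtime_error" ms := by
              unfold pvCA; simp [h]
            have e3 : pvCA fd "timeout" (m :: ms) = pvCA fd "timeout" ms + 1 := by
              unfold pvCA; simp [h]
            rw [e1, e2, e3]
            simp only [pvD3, PySem.Dict.mk.injEq, List.cons.injEq, Prod.mk.injEq, true_and, and_true]
            omega
          · have hc : (pvD3 a b c).contains t = false := by
              simp [pvD3, PySem.Dict.contains]
              exact ⟨Ne.symm h1, Ne.symm h2, Ne.symm h3⟩
            simp only [List.foldl_cons, h, hc, Bool.false_eq_true, if_false, ih]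
            have e1 : pvCA fd "assertion_error" (m :: ms) = pvCA fd "assertion_error" ms := by
              unfold pvCA; simp [h, h1]
            have e2 : pvCA fd "runtime_error" (m :: ms) = pvCA fd "runtime_error" ms := by
              unfold pvCA; simp [h, h2]
            have e3 : pvCA fd "timeout" (m :: ms) = pvCA fd "timeout" ms := by
              unfold pvCA; simp [h, h3]
            rw [e1, e2, e3]

theorem pvB_loop (ps : List (String × String)) (w : String → Int) (a b c : Int) :
    ps.foldl (fun r p =>
      if r.contains p.2 then r.modify p.2 0 (· + w p.1) else r) (pvD3 a b c)
    = pvD3 (a + pvCB ps "assertion_error" w) (b + pvCB ps "runtime_error" w)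
           (c + pvCB ps "timeout" w) := by
  induction ps generalizing a b c with
  | nil => simp [pvCB]
  | cons p ps ih =>
    obtain ⟨k, v⟩ := p
    by_cases h1 : v = "assertion_error"
    · subst h1
      have hc : (pvD3 a b c).contains "assertion_error" = true := rfl
      have hm : (pvD3 a b c).modify "assertion_error" 0 (· + w k) = pvD3 (a + w k) b c := rfl
      simp only [List.foldl_cons, hc, if_true, hm, ih]
      have e1 : pvCB ((k, "assertion_error") :: ps) "assertion_error" w
          = w k + pvCB ps "assertion_error" w := by unfold pvCB; simp
      have e2 : pvCB ((k, "assertion_error") :: ps) "runtime_error" w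
          = pvCB ps "runtime_error" w := by unfold pvCB; simp
      have e3 : pvCB ((k, "assertion_error") :: ps) "timeout" w
          = pvCB ps "timeout" w := by unfold pvCB; simp
      rw [e1, e2, e3]
      simp only [pvD3, PySem.Dict.mk.injEq, List.cons.injEq, Prod.mk.injEq, true_and, and_true]
      omega
    · by_cases h2 : v = "runtime_error"
      · subst h2
        have hc : (pvD3 a b c).contains "runtime_error" = true := rfl
        have hm : (pvD3 a b c).modify "runtime_error" 0 (· + w k) = pvD3 a (b + w k) c := rfl
        simp only [List.foldl_cons, hc, if_true, hm, ih]
        have e1 : pvCB ((k, "runtime_error") :: ps) "assertion_error" w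
            = pvCB ps "assertion_error" w := by unfold pvCB; simp
        have e2 : pvCB ((k, "runtime_error") :: ps) "runtime_error" w
            = w k + pvCB ps "runtime_error" w := by unfold pvCB; simp
        have e3 : pvCB ((k, "runtime_error") :: ps) "timeout" w
            = pvCB ps "timeout" w := by unfold pvCB; simp
        rw [e1, e2, e3]
        simp only [pvD3, PySem.Dict.mk.injEq, List.cons.injEq, Prod.mk.injEq, true_and, and_true]
        omega
      · by_cases h3 : v = "timeout"
        · subst h3
          have hc : (pvD3 a b c).contains "timeout" = true := rfl
          have hm : (pvD3 a b c).modify "timeout" 0 (· + w k) = pvD3 a b (c + w k) := rfl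
          simp only [List.foldl_cons, hc, if_true, hm, ih]
          have e1 : pvCB ((k, "timeout") :: ps) "assertion_error" w
              = pvCB ps "assertion_error" w := by unfold pvCB; simp
          have e2 : pvCB ((k, "timeout") :: ps) "runtime_error" w
              = pvCB ps "runtime_error" w := by unfold pvCB; simp
          have e3 : pvCB ((k, "timeout") :: ps) "timeout" w
              = w k + pvCB ps "timeout" w := by unfold pvCB; simp
          rw [e1, e2, e3]
          simp only [pvD3, PySem.Dict.mk.injEq, List.cons.injEq, Prod.mk.injEq, true_and, and_true]
          omega
        · have hc : (pvD3 a b c).contains (k, v).2 = false := by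
            simp [pvD3, PySem.Dict.contains]
            exact ⟨Ne.symm h1, Ne.symm h2, Ne.symm h3⟩
          simp only [List.foldl_cons, hc, Bool.false_eq_true, if_false, ih]
          have e1 : pvCB ((k, v) :: ps) "assertion_error" w
              = pvCB ps "assertion_error" w := by unfold pvCB; simp [h1]
          have e2 : pvCB ((k, v) :: ps) "runtime_error" w
              = pvCB ps "runtime_error" w := by unfold pvCB; simp [h2]
          have e3 : pvCB ((k, v) :: ps) "timeout" w
              = pvCB ps "timeout" w := by unfold pvCB; simp [h3]
          rw [e1, e2, e3]

-- splitting a filter whose predicate tests the head key of an association list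
theorem pvFilter_if_length (ms : List String) (k : String) (cnd : Bool) (q : String → Bool)
    (hq : q k = false) :
    (ms.filter (fun m => if m = k then cnd else q m)).length
      = (if cnd then ms.count k else 0) + (ms.filter q).length := by
  induction ms with
  | nil => simp
  | cons m ms ih =>
    by_cases h : m = k
    · subst h
      cases cnd <;> simp [hq] at ih ⊢ <;> omega
    · cases cnd <;> cases hqm : q m <;>
        simp [h, hqm] at ih ⊢ <;> omega

-- the counting identity: under unique keys, A's per-bucket count equals B's weighted sum
theorem pvCA_eq_pvCB (ps : List (String × String)) (t : String) (ms : List String)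
    (hnd : (ps.map Prod.fst).Nodup) :
    pvCA (PySem.Dict.mk ps) t ms = pvCB ps t (fun k => (ms.count k : Int)) := by
  induction ps with
  | nil => simp [pvCA, pvCB, PySem.Dict.get?]
  | cons p ps ih =>
    obtain ⟨k, v⟩ := p
    simp only [List.map_cons, List.nodup_cons] at hnd
    obtain ⟨hk, hnd'⟩ := hnd
    have hget : (PySem.Dict.mk ps).get? k = none := by
      rw [PySem.Dict.get?_eq_none_iff_not_mem_keys]
      simpa [PySem.Dict.keys] using hk
    have hfun : (fun m => (PySem.Dict.mk ((k, v) :: ps)).get? m == some t)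
        = fun m => if m = k then (v == t) else ((PySem.Dict.mk ps).get? m == some t) := by
      funext m
      rw [PySem.Dict.get?_mk_cons]
      by_cases hmk : m = k
      · simp [hmk]
      · have hkm : (k == m) = false := by simp [Ne.symm hmk]
        simp [hkm, hmk]
    have hq : ((PySem.Dict.mk ps).get? k == some t) = false := by simp [hget]
    unfold pvCA
    rw [hfun, pvFilter_if_length ms k (v == t) _ hq]
    have hih := ih hnd'
    unfold pvCA pvCB at hih
    unfold pvCB
    simp only [List.filter_cons]
    by_cases hv : v = t
    · subst hv
      simp only [beq_self_eq_true, if_true, List.map_cons, List.sum_cons]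
      push_cast
      rw [hih]
    · have hvf : (v == t) = false := by simp [hv]
      simp only [hvf, Bool.false_eq_true, if_false]
      simpa using hih

-- ===== VERDICT (by name: the statement is the Claim_ definition above) =====
theorem count_error_types_spec : Claim_equal_count_error_types := by
  intro failure_details test_methods _ hpre
  unfold Spec_count_error_types count_error_types count_error_types_alt
  have hinit : ((PySem.Dict.empty.insert "assertion_error" (0:Int)).insert "runtime_error" 0).insert "timeout" 0
      = pvD3 0 0 0 := by decide
  have hfreq : ∀ k, (test_methods.foldl (fun d m => d.insert m (d.getD m 0 + 1))
      PySem.Dict.empty).getD k 0 = (test_methods.count k : Int) := by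
    intro k
    rw [PySem.Dict.getD_foldl_insert_add_one]
    simp [PySem.Dict.getD_empty]
  simp only [hinit]
  rw [pvA_loop]
  have hB := pvB_loop failure_details
      (fun k => (test_methods.foldl (fun d m => d.insert m (d.getD m 0 + 1))
        PySem.Dict.empty).getD k 0) 0 0 0
  rw [hB]
  have hw : pvCB failure_details "assertion_error" (fun k => (test_methods.foldl (fun d m => d.insert m (d.getD m 0 + 1)) PySem.Dict.empty).getD k 0) = pvCB failure_details "assertion_error" (fun k => (test_methods.count k : Int)) := by
    unfold pvCB; congr 1; exact List.map_congr_left (fun p _ => hfreq p.1)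
  have hw2 : pvCB failure_details "runtime_error" (fun k => (test_methods.foldl (fun d m => d.insert m (d.getD m 0 + 1)) PySem.Dict.empty).getD k 0) = pvCB failure_details "runtime_error" (fun k => (test_methods.count k : Int)) := by
    unfold pvCB; congr 1; exact List.map_congr_left (fun p _ => hfreq p.1)
  have hw3 : pvCB failure_details "timeout" (fun k => (test_methods.foldl (fun d m => d.insert m (d.getD m 0 + 1)) PySem.Dict.empty).getD k 0) = pvCB failure_details "timeout" (fun k => (test_methods.count k : Int)) := by
    unfold pvCB; congr 1; exact List.map_congr_left (fun p _ => hfreq p.1)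
  rw [hw, hw2, hw3,
     pvCA_eq_pvCB failure_details "assertion_error" test_methods hpre,
     pvCA_eq_pvCB failure_details "runtime_error" test_methods hpre,
     pvCA_eq_pvCB failure_details "timeout" test_methods hpre]
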